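-- pv_equiv track=rewrite | github.com/aluramh/DailyCodingProblems | DailyCodingProblems/problem239.py | swipe
-- ===== SOURCE A (Python) =====
-- def swipe(start: int, end: int):
--     start_index = start - 1
--     end_index = end - 1
--
--     # how many vertical?
--     start_row = start // 3
--     end_row = end // 3
--
--     # how many horizontal?
--     start_col = start_index % 3
--     end_col = end_index % 3
--
--     # return all I pass through
--     passes_through = []
--     while start_row != end_row or start_col != end_col:
--         # Move the x-axis if needed
--         if start_row < end_row:
--             start_row += 1
--         elif start_row > end_row:
--             start_row -= 1
--
--         # move the y-axis if needed
--         if start_col < end_col: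
--             start_col += 1
--         elif start_col > end_col:
--             start_col -= 1
--
--         # The next x,y is another digit that we passed through. Jot that down.
--         next_index = (3 * start_row) + start_col
--         passes_through.append(next_index + 1)
--
--     return passes_through
-- ===== SOURCE B (Python) =====
-- def swipe(start: int, end: int):
--     # Closed form: the cell visited at step k is computed directly from k
--     # (each axis moves one unit per step until clamped at its target), so
--     # every element of the answer is a random-access function of its index.
--     sr, er = start // 3, end // 3
--     sc, ec = (start - 1) % 3, (end - 1) % 3
--
--     def pos(a, b, k):
--         d = b - a
--         s = (d > 0) - (d < 0)
--         return a + s * min(k, abs(d))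
--
--     n = max(abs(er - sr), abs(ec - sc))
--     return [3 * pos(sr, er, k) + pos(sc, ec, k) + 1 for k in range(1, n + 1)]
-- ===== Notes on version B (the rewrite author's own statement) =====
-- stated objective: alternative
-- what changed: Replaces A's stateful simulation (a while-loop mutating row/col one step at a time, re-deciding directions each iteration) by a closed-form random-access formula: each visited cell is computed independently from its step index k via a clamped linear-motion expression, so no sequential state is carried at all.
import Mathlib
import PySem

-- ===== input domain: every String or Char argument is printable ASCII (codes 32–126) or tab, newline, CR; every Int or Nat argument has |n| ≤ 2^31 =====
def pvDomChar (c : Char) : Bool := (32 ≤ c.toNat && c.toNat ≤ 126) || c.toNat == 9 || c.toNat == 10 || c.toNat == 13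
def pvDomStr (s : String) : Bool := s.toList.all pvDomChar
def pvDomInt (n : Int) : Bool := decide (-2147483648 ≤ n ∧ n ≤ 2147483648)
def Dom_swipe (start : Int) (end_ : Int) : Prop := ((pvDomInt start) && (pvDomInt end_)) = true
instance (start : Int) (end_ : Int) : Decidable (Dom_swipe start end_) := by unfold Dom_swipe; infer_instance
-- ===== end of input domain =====

-- B replaces A's stateful step-by-step simulation by a closed-form random-access
-- formula for the cell at step k (alternative decomposition, same cost).

-- ===== PORT A =====
-- A's while-loop: each iteration moves the row and/or column one step toward the
-- target and records the cell. The fuel argument only makes the recursion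
-- structural; swipe passes the exact number of iterations the loop performs
-- (|er-r| + |ec-c| bounds it), so the 0-fuel branch is never the reason to stop.
def swipeLoop (fuel : Nat) (er ec r c : Int) : List Int :=
  match fuel with
  | 0 => []
  | fuel + 1 =>
    if r ≠ er ∨ c ≠ ec then
      let r' : Int := if r < er then r + 1 else if er < r then r - 1 else r
      let c' : Int := if c < ec then c + 1 else if ec < c then c - 1 else c
      (3 * r' + c' + 1) :: swipeLoop fuel er ec r' c'
    else []

def swipe (start : Int) (end_ : Int) : List Int :=
  let start_index := start - 1
  let end_index := end_ - 1
  let start_row := PySem.Int.floordiv start 3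
  let end_row := PySem.Int.floordiv end_ 3
  let start_col := PySem.Int.mod start_index 3
  let end_col := PySem.Int.mod end_index 3
  swipeLoop ((end_row - start_row).natAbs + (end_col - start_col).natAbs)
    end_row end_col start_row start_col

-- ===== PORT B =====
-- Source B's helper pos(a, b, k): the axis position after k unit steps from a
-- toward b, clamped at b, written exactly as Source B computes it.
def posB (a b k : Int) : Int :=
  let d := b - a
  let s : Int := (if 0 < d then 1 else 0) - (if d < 0 then 1 else 0)
  a + s * min k |d|

-- Source B's comprehension over range(1, n+1) with n = max(|dr|, |dc|).
def swipe_alt (start : Int) (end_ : Int) : List Int :=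
  let sr := PySem.Int.floordiv start 3
  let er := PySem.Int.floordiv end_ 3
  let sc := PySem.Int.mod (start - 1) 3
  let ec := PySem.Int.mod (end_ - 1) 3
  let n := max (er - sr).natAbs (ec - sc).natAbs
  (List.range n).map (fun (k : Nat) => 3 * posB sr er ((k : Int) + 1) + posB sc ec ((k : Int) + 1) + 1)

-- ===== PRECONDITION & SPEC =====
def Spec_swipe (start : Int) (end_ : Int) (out : List Int) : Prop := out = swipe_alt start end_
instance (start : Int) (end_ : Int) (out : List Int) : Decidable (Spec_swipe start end_ out) := by unfold Spec_swipe; infer_instance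

-- ===== CLAIM (what is proved, stated in full; the proofs are below) =====
def Claim_equal_swipe : Prop := ∀ (start : Int) (end_ : Int), Dom_swipe start end_ → Spec_swipe start end_ (swipe start end_)

-- ===== LEMMAS AND PROOFS =====

-- Sign of an integer, as Source B's (d > 0) - (d < 0).
def sgn (x : Int) : Int := (if 0 < x then 1 else 0) - (if x < 0 then 1 else 0)

-- Position after k unit steps toward target t, clamped (Nat-min form).
def posAfter (t r : Int) (k : Nat) : Int :=
  r + sgn (t - r) * ((min k (t - r).natAbs : Nat) : Int)

-- Common value of both programs: the list of cells, one per step.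
def closedForm (er ec r c : Int) : List Int :=
  (List.range (max (er - r).natAbs (ec - c).natAbs)).map
    (fun k => 3 * posAfter er r (k + 1) + posAfter ec c (k + 1) + 1)

theorem posB_eq_posAfter (a b : Int) (k : Nat) :
    posB a b ((k : Int) + 1) = posAfter b a (k + 1) := by
  simp only [posB, posAfter, sgn]
  push_cast [Int.cast_natAbs]
  ring

theorem posAfter_step (t r : Int) (k : Nat) :
    posAfter t r (k + 2) = posAfter t (r + sgn (t - r)) (k + 1) := by
  unfold posAfter sgn; split_ifs <;> omega

theorem natAbs_sub_sgn (t r : Int) :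
    (t - (r + sgn (t - r))).natAbs = (t - r).natAbs - 1 := by
  unfold sgn; split_ifs <;> omega

theorem closedForm_nil (er ec : Int) : closedForm er ec er ec = [] := by
  simp [closedForm]

theorem closedForm_step (er ec r c : Int) (h : r ≠ er ∨ c ≠ ec) :
    closedForm er ec r c =
      (3 * (r + sgn (er - r)) + (c + sgn (ec - c)) + 1) ::
        closedForm er ec (r + sgn (er - r)) (c + sgn (ec - c)) := by
  unfold closedForm
  have hmax : max (er - r).natAbs (ec - c).natAbs
      = max (er - (r + sgn (er - r))).natAbs (ec - (c + sgn (ec - c))).natAbs + 1 := by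
    rw [natAbs_sub_sgn, natAbs_sub_sgn]
    have h1 : (er - r).natAbs ≠ 0 ∨ (ec - c).natAbs ≠ 0 := by
      rcases h with h | h
      · left; omega
      · right; omega
    omega
  rw [hmax, List.range_succ_eq_map, List.map_cons, List.map_map]
  congr 1
  · have h1 : posAfter er r 1 = r + sgn (er - r) := by unfold posAfter sgn; split_ifs <;> omega
    have h2 : posAfter ec c 1 = c + sgn (ec - c) := by unfold posAfter sgn; split_ifs <;> omega
    rw [show (0 + 1 : Nat) = 1 from rfl, h1, h2]
  apply List.map_congr_left
  intro k _
  simp only [Function.comp_apply, Nat.succ_eq_add_one]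
  rw [show k + 1 + 1 = k + 2 from rfl, posAfter_step, posAfter_step]

theorem swipeLoop_eq_closedForm (fuel : Nat) (er ec r c : Int)
    (hf : (er - r).natAbs + (ec - c).natAbs ≤ fuel) :
    swipeLoop fuel er ec r c = closedForm er ec r c := by
  induction fuel generalizing r c with
  | zero =>
    have h1 : r = er := by omega
    have h2 : c = ec := by omega
    rw [swipeLoop, h1, h2, closedForm_nil]
  | succ fuel ih =>
    rw [swipeLoop]
    by_cases h : r ≠ er ∨ c ≠ ec
    · simp only [if_pos h]
      have hr : (if r < er then r + 1 else if er < r then r - 1 else r) = r + sgn (er - r) := by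
        unfold sgn; split_ifs <;> omega
      have hc : (if c < ec then c + 1 else if ec < c then c - 1 else c) = c + sgn (ec - c) := by
        unfold sgn; split_ifs <;> omega
      have hf' : (er - (r + sgn (er - r))).natAbs + (ec - (c + sgn (ec - c))).natAbs ≤ fuel := by
        rw [natAbs_sub_sgn, natAbs_sub_sgn]
        have : (er - r).natAbs ≠ 0 ∨ (ec - c).natAbs ≠ 0 := by
          rcases h with h | h
          · left; omega
          · right; omega
        omega
      rw [hr, hc, ih _ _ hf', closedForm_step er ec r c h]
    · simp only [if_neg h]
      have h2 : r = er ∧ c = ec := by tauto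
      rw [h2.1, h2.2, closedForm_nil]

theorem swipe_alt_eq_closedForm (start end_ : Int) :
    swipe_alt start end_ =
      closedForm (PySem.Int.floordiv end_ 3) (PySem.Int.mod (end_ - 1) 3)
        (PySem.Int.floordiv start 3) (PySem.Int.mod (start - 1) 3) := by
  unfold swipe_alt closedForm
  apply List.map_congr_left
  intro k _
  rw [posB_eq_posAfter, posB_eq_posAfter]

-- ===== VERDICT (by name: the statement is the Claim_ definition above) =====
theorem swipe_spec : Claim_equal_swipe := by
  intro start end_ _
  unfold Spec_swipe swipe
  rw [swipe_alt_eq_closedForm]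
  exact swipeLoop_eq_closedForm _ _ _ _ _ le_rfl
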